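-- pv_equiv track=rewrite | github.com/sanan2004/Log-Analysis_CTI | cti_enricher.py | check_suspicious_user_agents
-- ===== SOURCE A (Python) =====
-- def check_suspicious_user_agents(user_agents):
--     """Check for known malicious user agents"""
--     suspicious_patterns = [
--         'sqlmap', 'nmap', 'hydra', 'nikto', 'metasploit',
--         'wget', 'curl', 'dirbuster', 'gobuster', 'ffuf',
--         'burpsuite', 'acunetix', 'nessus', 'openvas', 'zap',
--         'havij', 'sqlninja', 'w3af', 'skipfish', 'arachni'
--     ]
--
--     suspicious = []
--     for agent in user_agents:
--         agent_lower = agent.lower()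
--         for pattern in suspicious_patterns:
--             if pattern in agent_lower:
--                 suspicious.append(agent)
--                 break
--
--     return suspicious
-- ===== SOURCE B (Python) =====
-- import re
--
-- _SUSPICIOUS_PATTERNS = [
--     'sqlmap', 'nmap', 'hydra', 'nikto', 'metasploit',
--     'wget', 'curl', 'dirbuster', 'gobuster', 'ffuf',
--     'burpsuite', 'acunetix', 'nessus', 'openvas', 'zap',
--     'havij', 'sqlninja', 'w3af', 'skipfish', 'arachni'
-- ]
-- # all patterns are plain alphanumeric, so no escaping is needed
-- _PAT = re.compile('|'.join(_SUSPICIOUS_PATTERNS))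
--
--
-- def check_suspicious_user_agents(user_agents):
--     """Check for known malicious user agents"""
--     return [agent for agent in user_agents if _PAT.search(agent.lower())]
-- ===== Notes on version B (the rewrite author's own statement) =====
-- stated objective: idiomatic
-- what changed: Replaced the explicit accumulator loop with a per-agent inner scan over 20 substrings (break on first hit) by one precompiled alternation regex searched once per agent inside a list comprehension.
import Mathlib
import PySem

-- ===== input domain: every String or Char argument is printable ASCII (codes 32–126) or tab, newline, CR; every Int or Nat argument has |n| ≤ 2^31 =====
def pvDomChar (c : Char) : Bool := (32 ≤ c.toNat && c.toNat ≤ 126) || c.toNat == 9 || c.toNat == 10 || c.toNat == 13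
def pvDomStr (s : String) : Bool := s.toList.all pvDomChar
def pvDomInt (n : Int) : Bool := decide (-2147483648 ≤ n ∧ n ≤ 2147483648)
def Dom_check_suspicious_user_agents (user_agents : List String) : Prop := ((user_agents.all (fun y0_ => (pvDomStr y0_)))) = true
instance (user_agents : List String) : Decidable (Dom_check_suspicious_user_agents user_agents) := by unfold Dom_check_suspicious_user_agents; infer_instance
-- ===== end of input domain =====

-- B replaces A's explicit accumulator loop with inner 20-pattern scan by one precompiled
-- alternation regex (position-by-position automaton scan) inside a list comprehension (idiomatic).


def suspiciousPatterns : List String :=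
  ["sqlmap", "nmap", "hydra", "nikto", "metasploit",
   "wget", "curl", "dirbuster", "gobuster", "ffuf",
   "burpsuite", "acunetix", "nessus", "openvas", "zap",
   "havij", "sqlninja", "w3af", "skipfish", "arachni"]

-- ===== PORT A =====
-- A's inner 'for pattern in suspicious_patterns: if pattern in agent_lower: …; break':
-- returns whether the break fired (i.e. whether the agent gets appended).
def innerLoopA (pats : List String) (agentLower : String) : Bool :=
  match pats with
  | [] => false
  | p :: rest => if PySem.Str.isIn p agentLower then true else innerLoopA rest agentLower

def check_suspicious_user_agents (user_agents : List String) : List String :=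
  user_agents.foldl
    (fun suspicious agent =>
      if innerLoopA suspiciousPatterns (PySem.Str.lower agent) then suspicious ++ [agent]
      else suspicious)
    []

-- ===== PORT B =====
-- re.search of the alternation 'sqlmap|nmap|…' over a string of plain literal alternatives:
-- at each start position try the alternatives in order; advance one char on failure.
def altMatchesAt (pats : List String) (cs : List Char) : Bool :=
  pats.any (fun p => PySem.Chars.startswith cs p.toList)

def reSearch (pats : List String) (cs : List Char) : Bool :=
  if altMatchesAt pats cs then true
  else
    match cs with
    | [] => false
    | _ :: t => reSearch pats t

def check_suspicious_user_agents_alt (user_agents : List String) : List String :=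
  user_agents.filter (fun agent => reSearch suspiciousPatterns (PySem.Str.lower agent).toList)

-- ===== PRECONDITION & SPEC =====
def Spec_check_suspicious_user_agents (user_agents : List String) (out : List String) : Prop := out = check_suspicious_user_agents_alt user_agents
instance (user_agents : List String) (out : List String) : Decidable (Spec_check_suspicious_user_agents user_agents out) := by unfold Spec_check_suspicious_user_agents; infer_instance

-- ===== CLAIM (what is proved, stated in full; the proofs are below) =====
def Claim_equal_check_suspicious_user_agents : Prop := ∀ (user_agents : List String), Dom_check_suspicious_user_agents user_agents → Spec_check_suspicious_user_agents user_agents (check_suspicious_user_agents user_agents)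

-- ===== LEMMAS AND PROOFS =====

-- A's inner break-loop is 'some pattern is a substring'.
theorem innerLoopA_eq_any (pats : List String) (s : String) :
    innerLoopA pats s = pats.any (fun p => PySem.Str.isIn p s) := by
  induction pats with
  | nil => rfl
  | cons p rest ih =>
      rw [innerLoopA, List.any_cons, ih]
      cases PySem.Str.isIn p s <;> simp

-- B's position scan finds a match iff some alternative is an infix.
theorem reSearch_true_iff (pats : List String) (cs : List Char) :
    reSearch pats cs = true ↔ ∃ p ∈ pats, p.toList <:+: cs := by
  induction cs with
  | nil =>
      rw [reSearch]
      by_cases h : altMatchesAt pats [] = true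
      · simp only [h, if_true, true_iff]
        rcases List.any_eq_true.mp h with ⟨p, hp, hm⟩
        exact ⟨p, hp, ((PySem.Chars.startswith_iff _ _).mp hm).isInfix⟩
      · simp only [h, Bool.false_eq_true, if_false]
        constructor
        · intro hf; exact absurd hf (by simp)
        · rintro ⟨p, hp, hinf⟩
          exact absurd (List.any_eq_true.mpr ⟨p, hp,
            (PySem.Chars.startswith_iff _ _).mpr (by simp [List.infix_nil.mp hinf])⟩) h
  | cons c t ih =>
      rw [reSearch]
      by_cases h : altMatchesAt pats (c :: t) = true
      · simp only [h, if_true, true_iff]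
        rcases List.any_eq_true.mp h with ⟨p, hp, hm⟩
        exact ⟨p, hp, ((PySem.Chars.startswith_iff _ _).mp hm).isInfix⟩
      · simp only [h, Bool.false_eq_true, if_false]
        rw [ih]
        constructor
        · rintro ⟨p, hp, hinf⟩; exact ⟨p, hp, hinf.trans (List.infix_cons_iff.mpr (Or.inr (List.infix_refl t)))⟩
        · rintro ⟨p, hp, hinf⟩
          rcases (List.infix_cons_iff).mp hinf with hpre | hinf'
          · exact absurd (List.any_eq_true.mpr ⟨p, hp,
              (PySem.Chars.startswith_iff _ _).mpr hpre⟩) h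
          · exact ⟨p, hp, hinf'⟩

theorem predicates_agree (s : String) :
    innerLoopA suspiciousPatterns s = reSearch suspiciousPatterns s.toList := by
  rw [innerLoopA_eq_any]
  by_cases h : reSearch suspiciousPatterns s.toList = true
  · rw [h]
    rcases (reSearch_true_iff _ _).mp h with ⟨p, hp, hinf⟩
    exact List.any_eq_true.mpr ⟨p, hp, (PySem.Str.isIn_iff_infix _ _).mpr hinf⟩
  · rw [Bool.not_eq_true] at h
    rw [h, List.any_eq_false]
    intro p hp hcontra
    exact absurd ((reSearch_true_iff _ _).mpr
      ⟨p, hp, (PySem.Str.isIn_iff_infix _ _).mp hcontra⟩) (by simp [h])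

-- ===== VERDICT (by name: the statement is the Claim_ definition above) =====
theorem check_suspicious_user_agents_spec : Claim_equal_check_suspicious_user_agents := by
  intro user_agents _
  unfold Spec_check_suspicious_user_agents check_suspicious_user_agents check_suspicious_user_agents_alt
  rw [PySem.List.foldl_append_if_eq_filter, List.nil_append]
  exact List.filter_congr (fun a _ => predicates_agree (PySem.Str.lower a))
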